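-- pv_equiv track=rewrite | github.com/VandalByte/darkmatter-grub2-theme | install.py | invalid_arguments
-- ===== SOURCE A (Python) =====
-- def invalid_arguments(arg_list, style_list):
--
--     if len(arg_list) > 3:       # more than 3 arguments
--         return True
--
--     elif len(arg_list) == 3:    # 3 arguments
--         if "-y" in arg_list:
--             pass
--         else:
--             return True
--         for style in style_list:
--             if style in arg_list:
--                 return False
--         else:
--             return True
--
--     elif len(arg_list) == 2:    # 2 arguments
--         if "-y" in arg_list:
--             return False
--         else:
--             for style in style_list:
--                 if style in arg_list:
--                     return False
--             else:
--                 return True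
--
--     else:                       # 1 argument (only filename)
--         return False
-- ===== SOURCE B (Python) =====
-- def invalid_arguments(arg_list, style_list):
--     # Arithmetic reformulation: besides the filename, each extra argument must be
--     # justified by a distinct satisfied "role" ('-y' present / a style present).
--     # There are at most 2 roles, so the call is invalid exactly when the number of
--     # satisfied roles is smaller than len(arg_list) - 1.
--     styles = set(style_list)
--     has_y = False
--     has_style = False
--     for a in arg_list:
--         if a == "-y":
--             has_y = True
--         if a in styles:
--             has_style = True
--     return int(has_y) + int(has_style) < len(arg_list) - 1
-- ===== Notes on version B (the rewrite author's own statement) =====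
-- stated objective: alternative
-- what changed: Replaces A's length dispatch with nested for/else membership loops by a single pass over arg_list collecting two role flags against a precomputed style set, and a closed arithmetic validity test: invalid iff satisfied-roles < len(arg_list)-1.
import Mathlib
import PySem

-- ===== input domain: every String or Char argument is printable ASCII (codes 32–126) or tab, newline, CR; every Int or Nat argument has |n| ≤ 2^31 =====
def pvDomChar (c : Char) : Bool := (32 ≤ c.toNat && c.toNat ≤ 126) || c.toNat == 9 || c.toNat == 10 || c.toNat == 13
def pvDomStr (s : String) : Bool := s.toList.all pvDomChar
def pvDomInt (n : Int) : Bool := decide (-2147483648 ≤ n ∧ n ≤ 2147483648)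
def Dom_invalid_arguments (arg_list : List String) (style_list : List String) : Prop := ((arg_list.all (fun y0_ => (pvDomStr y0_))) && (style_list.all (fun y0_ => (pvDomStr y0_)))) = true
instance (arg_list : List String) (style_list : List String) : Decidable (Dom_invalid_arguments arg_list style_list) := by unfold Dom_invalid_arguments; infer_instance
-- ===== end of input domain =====

-- B replaces A's length dispatch with nested membership loops by one pass over
-- arg_list collecting two role flags against a style set, and a closed
-- arithmetic validity test: invalid iff satisfied roles < len(arg_list) - 1.

-- ===== PORT A =====
-- the for/else loop "for style in style_list: if style in arg_list: return False; else: return True"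
def pvLoopA : List String → List String → Bool
  | [], _ => true
  | style :: rest, arg_list =>
      if arg_list.contains style then false else pvLoopA rest arg_list

def invalid_arguments (arg_list : List String) (style_list : List String) : Bool :=
  if arg_list.length > 3 then true
  else if arg_list.length == 3 then
    if arg_list.contains "-y" then pvLoopA style_list arg_list
    else true
  else if arg_list.length == 2 then
    if arg_list.contains "-y" then false
    else pvLoopA style_list arg_list
  else false

-- ===== PORT B =====
def invalid_arguments_alt (arg_list : List String) (style_list : List String) : Bool :=
  let styles := PySem.Set.ofList style_list
  let p := arg_list.foldl
    (fun (p : Bool × Bool) a =>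
      (if a == "-y" then true else p.1,
       if PySem.Set.contains styles a then true else p.2))
    (false, false)
  decide (((if p.1 then (1 : Int) else 0) + (if p.2 then (1 : Int) else 0))
            < (arg_list.length : Int) - 1)

-- ===== PRECONDITION & SPEC =====
def Spec_invalid_arguments (arg_list : List String) (style_list : List String) (out : Bool) : Prop := out = invalid_arguments_alt arg_list style_list
instance (arg_list : List String) (style_list : List String) (out : Bool) : Decidable (Spec_invalid_arguments arg_list style_list out) := by unfold Spec_invalid_arguments; infer_instance

-- ===== CLAIM (what is proved, stated in full; the proofs are below) =====
def Claim_equal_invalid_arguments : Prop := ∀ (arg_list : List String) (style_list : List String), Dom_invalid_arguments arg_list style_list → Spec_invalid_arguments arg_list style_list (invalid_arguments arg_list style_list)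

-- ===== LEMMAS AND PROOFS =====
theorem pvLoopA_eq_not_any (style_list arg_list : List String) :
    pvLoopA style_list arg_list = !(style_list.any (fun s => arg_list.contains s)) := by
  induction style_list with
  | nil => rfl
  | cons s rest ih => simp [pvLoopA, List.any_cons, ih]

-- the single pass of B computes the two "role" flags
theorem pvFoldB_eq (arg_list : List String) (styles : PySem.Set String) (b1 b2 : Bool) :
    arg_list.foldl
      (fun (p : Bool × Bool) a =>
        (if a == "-y" then true else p.1,
         if PySem.Set.contains styles a then true else p.2)) (b1, b2)
      = (b1 || arg_list.any (fun a => a == "-y"),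
         b2 || arg_list.any (fun a => PySem.Set.contains styles a)) := by
  induction arg_list generalizing b1 b2 with
  | nil => simp
  | cons a rest ih =>
      simp only [List.foldl_cons, List.any_cons, ih]
      by_cases h1 : a == "-y" <;> by_cases h2 : PySem.Set.contains styles a <;>
        cases b1 <;> cases b2 <;> simp [h1, h2]

-- the two "some common element" tests agree whichever list is scanned
theorem pvAny_comm (arg_list style_list : List String) :
    arg_list.any (fun a => PySem.Set.contains (PySem.Set.ofList style_list) a)
      = style_list.any (fun s => arg_list.contains s) := by
  simp only [List.any_eq, decide_eq_decide]
  constructor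
  · rintro ⟨a, ha, h⟩
    exact ⟨a, by simpa [PySem.Set.contains] using h, by simpa using ha⟩
  · rintro ⟨s, hs, h⟩
    exact ⟨s, by simpa using h, by simpa [PySem.Set.contains] using hs⟩

-- ===== VERDICT (by name: the statement is the Claim_ definition above) =====
theorem invalid_arguments_spec : Claim_equal_invalid_arguments := by
  intro arg_list style_list _
  unfold Spec_invalid_arguments invalid_arguments invalid_arguments_alt
  simp only [pvLoopA_eq_not_any, pvFoldB_eq, Bool.false_or, pvAny_comm]
  have hyc : ∀ l : List String, (l.any fun a => a == "-y") = l.contains "-y" := by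
    intro l
    induction l with
    | nil => simp
    | cons a t ih =>
        by_cases h : a = "-y"
        · simp [h, ih]
        · simp [h, ih, Ne.symm h]
  rw [hyc arg_list]
  by_cases hy : arg_list.contains "-y" <;>
    by_cases hs : style_list.any (fun s => arg_list.contains s) <;>
      simp only [hy, hs] <;>
        rcases arg_list with _ | ⟨a, _ | ⟨b, _ | ⟨c, _ | l⟩⟩⟩ <;>
          simp <;> omega
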